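-- pv_equiv track=rewrite | github.com/MolfarUA/CodeWars_Solutions | 7 kyu/Password maker/solution.py | make_password
-- ===== SOURCE A (Python) =====
-- def make_password(phrase):
--     new = ""
--     phrase = phrase.replace("i", "1").replace("I", "1")
--     phrase = phrase.replace("o", "0").replace("O", "0")
--     phrase = phrase.replace("s", "5").replace("S", "5")
--     phrase = phrase.split(" ")
--     for i in phrase:
--         new += i[0]
--     return new
-- ===== SOURCE B (Python) =====
-- _SUB = {"i": "1", "I": "1", "o": "0", "O": "0", "s": "5", "S": "5"}
--
--
-- def make_password(phrase):
--     return "".join(_SUB.get(w[0], w[0]) for w in phrase.split(" "))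
-- ===== Notes on version B (the rewrite author's own statement) =====
-- stated objective: simpler
-- what changed: Instead of rewriting the whole phrase with six full-string replace passes and then taking first letters, B splits first and substitutes only each word's first character via one lookup table (extract-then-transform, one pass over first letters).
import Mathlib
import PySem

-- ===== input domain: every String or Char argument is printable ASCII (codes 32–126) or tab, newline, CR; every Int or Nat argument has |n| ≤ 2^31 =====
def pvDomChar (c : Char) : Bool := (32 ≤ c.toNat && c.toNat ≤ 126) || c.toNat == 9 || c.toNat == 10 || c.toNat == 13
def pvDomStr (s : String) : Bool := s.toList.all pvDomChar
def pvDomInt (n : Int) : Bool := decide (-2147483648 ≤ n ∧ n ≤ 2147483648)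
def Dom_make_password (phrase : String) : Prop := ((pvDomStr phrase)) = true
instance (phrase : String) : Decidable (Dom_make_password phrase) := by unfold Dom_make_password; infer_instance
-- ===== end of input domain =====

-- B splits the phrase first and substitutes only each word's first character via a lookup
-- table, instead of A's six full-string replace passes followed by first-letter extraction.


-- ===== PORT A =====
def make_password (phrase : String) : String :=
  -- phrase = phrase.replace("i","1").replace("I","1").replace("o","0").replace("O","0")
  --                .replace("s","5").replace("S","5")  (the three reassignments, inlined)
  -- phrase = phrase.split(" "); for i in phrase: new += i[0]
  String.ofList ((((PySem.Str.split? (PySem.Str.replace (PySem.Str.replace (PySem.Str.replace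
      (PySem.Str.replace (PySem.Str.replace (PySem.Str.replace phrase "i" "1") "I" "1")
      "o" "0") "O" "0") "s" "5") "S" "5") " ").getD [])).foldl (fun acc w =>
    acc ++ ((PySem.Str.pyGet? w 0).map (fun c => [c])).getD []) [])

-- ===== PORT B =====
-- _SUB = {"i":"1","I":"1","o":"0","O":"0","s":"5","S":"5"} (1-char strings ported as Char)
def pvSUB : PySem.Dict Char Char :=
  PySem.Dict.mk [('i', '1'), ('I', '1'), ('o', '0'), ('O', '0'), ('s', '5'), ('S', '5')]

def make_password_alt (phrase : String) : String :=
  PySem.Str.join "" (((PySem.Str.split? phrase " ").getD []).map (fun w =>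
    match PySem.Str.pyGet? w 0 with
    | some c => String.ofList [pvSUB.getD c c]   -- _SUB.get(w[0], w[0])
    | none => ""))                               -- w[0] raises IndexError: outside Pre_

-- ===== PRECONDITION & SPEC =====
-- Pre_ excludes exactly the phrases whose single-space split contains an empty word
-- (empty phrase, leading/trailing space, doubled space): there both A and B raise IndexError on w[0].
def Pre_make_password (phrase : String) : Prop :=
  ∀ w ∈ PySem.Chars.splitOn phrase.toList [' '], w ≠ []
instance (phrase : String) : Decidable (Pre_make_password phrase) := by
  unfold Pre_make_password; infer_instance

def pvWitness_make_password : String := "Hello world iOS"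

def Spec_make_password (phrase : String) (out : String) : Prop := out = make_password_alt phrase
instance (phrase : String) (out : String) : Decidable (Spec_make_password phrase out) := by unfold Spec_make_password; infer_instance

-- ===== CLAIM (what is proved, stated in full; the proofs are below) =====
def Claim_equal_make_password : Prop := ∀ (phrase : String), Dom_make_password phrase → Pre_make_password phrase → Spec_make_password phrase (make_password phrase)

-- ===== LEMMAS AND PROOFS =====

-- A's six replacements, as one character map (proof-side only).
def pvRep (a b c : Char) : Char := if c = a then b else c
def pvChain (c : Char) : Char :=
  pvRep 'S' '5' (pvRep 's' '5' (pvRep 'O' '0' (pvRep 'o' '0' (pvRep 'I' '1' (pvRep 'i' '1' c)))))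

lemma replace_go_single (a b : Char) :
    ∀ (fuel : Nat) (l acc : List Char), l.length ≤ fuel →
      PySem.Chars.replace.go [a] [b] fuel l acc =
        acc.reverse ++ l.map (fun c => if c = a then b else c) := by
  intro fuel
  induction fuel with
  | zero => intro l acc h; cases l with
    | nil => simp [PySem.Chars.replace.go]
    | cons c t => simp at h
  | succ n ih =>
    intro l acc h
    cases l with
    | nil => simp [PySem.Chars.replace.go]
    | cons c t =>
      simp only [PySem.Chars.replace.go, List.isPrefixOf,
        Bool.and_true]
      by_cases hc : a = c
      · subst hc
        rw [if_pos (by simp)]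
        simpa using ih t ([b].reverse ++ acc) (by simpa using h)
      · rw [if_neg (by simp [hc])]
        rw [ih t _ (by simpa using h)]
        simp [Ne.symm hc]

lemma replace_single (a b : Char) (l : List Char) :
    PySem.Chars.replace l [a] [b] = l.map (fun c => if c = a then b else c) := by
  simp [PySem.Chars.replace, replace_go_single a b l.length l [] le_rfl]

lemma splitOn_go_map (g : Char → Char) (hg : ∀ c, g c = ' ' ↔ c = ' ') :
    ∀ (fuel : Nat) (l cur : List Char) (acc : List (List Char)),
      PySem.Chars.splitOn.go [' '] fuel (l.map g) (cur.map g) (acc.map (List.map g)) =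
        (PySem.Chars.splitOn.go [' '] fuel l cur acc).map (List.map g) := by
  intro fuel
  induction fuel with
  | zero => intro l cur acc; simp [PySem.Chars.splitOn.go]
  | succ n ih =>
    intro l cur acc
    cases l with
    | nil => simp [PySem.Chars.splitOn.go]
    | cons c t =>
      simp only [List.map_cons, PySem.Chars.splitOn.go, List.isPrefixOf,
        Bool.and_true]
      by_cases hc : c = ' '
      · rw [if_pos (by simp [hc, (hg ' ').mpr rfl]), if_pos (by simp [hc])]
        have := ih t [] (cur.reverse :: acc)
        simpa using this
      · rw [if_neg (by simp; exact fun h => hc ((hg c).mp h.symm)),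
            if_neg (by simp; exact fun h => hc h.symm)]
        exact ih t (c :: cur) acc

lemma splitOn_map (g : Char → Char) (hg : ∀ c, g c = ' ' ↔ c = ' ') (l : List Char) :
    PySem.Chars.splitOn (l.map g) [' '] =
      (PySem.Chars.splitOn l [' ']).map (List.map g) := by
  have := splitOn_go_map g hg (l.length + 1) l [] []
  simpa [PySem.Chars.splitOn] using this

lemma chain_space (c : Char) : pvChain c = ' ' ↔ c = ' ' := by
  unfold pvChain pvRep
  split_ifs <;> simp_all

lemma chain_eq_sub (c : Char) : pvChain c = pvSUB.getD c c := by
  unfold pvChain pvRep pvSUB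
  by_cases h1 : c = 'i'; · subst h1; decide
  by_cases h2 : c = 'I'; · subst h2; decide
  by_cases h3 : c = 'o'; · subst h3; decide
  by_cases h4 : c = 'O'; · subst h4; decide
  by_cases h5 : c = 's'; · subst h5; decide
  by_cases h6 : c = 'S'; · subst h6; decide
  have k1 : ('i' == c) = false := by simp [Ne.symm h1]
  have k2 : ('I' == c) = false := by simp [Ne.symm h2]
  have k3 : ('o' == c) = false := by simp [Ne.symm h3]
  have k4 : ('O' == c) = false := by simp [Ne.symm h4]
  have k5 : ('s' == c) = false := by simp [Ne.symm h5]
  have k6 : ('S' == c) = false := by simp [Ne.symm h6]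
  simp [PySem.Dict.getD, PySem.Dict.get?, List.find?, h1, h2, h3, h4, h5, h6,
        k1, k2, k3, k4, k5, k6]

lemma join_nil_eq_flatten (ps : List (List Char)) :
    PySem.Chars.join [] ps = ps.flatten := by
  induction ps with
  | nil => simp [PySem.Chars.join_nil]
  | cons p rest ih =>
    cases rest with
    | nil => simp [PySem.Chars.join, List.intercalate]
    | cons q r => rw [PySem.Chars.join_cons_cons]; simp [ih]

lemma chain_toList (phrase : String) :
    (PySem.Str.replace (PySem.Str.replace (PySem.Str.replace (PySem.Str.replace
      (PySem.Str.replace (PySem.Str.replace phrase "i" "1") "I" "1") "o" "0")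
      "O" "0") "s" "5") "S" "5").toList = phrase.toList.map pvChain := by
  simp only [PySem.Str.toList_replace]
  rw [show ("i":String).toList = ['i'] from rfl, show ("1":String).toList = ['1'] from rfl,
      show ("I":String).toList = ['I'] from rfl, show ("o":String).toList = ['o'] from rfl,
      show ("0":String).toList = ['0'] from rfl, show ("O":String).toList = ['O'] from rfl,
      show ("s":String).toList = ['s'] from rfl, show ("5":String).toList = ['5'] from rfl,
      show ("S":String).toList = ['S'] from rfl]
  simp only [replace_single, List.map_map]
  refine List.map_congr_left (fun c _ => ?_)
  simp only [pvChain, pvRep, Function.comp]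

-- Per-word agreement of the two ports' bodies, over the common split of the original phrase.
lemma core_flat : ∀ (ws : List (List Char)), (∀ w ∈ ws, w ≠ []) →
    List.flatMap (fun w => ((PySem.Str.pyGet? w 0).map (fun c => [c])).getD [])
        (ws.map (fun w => String.ofList (w.map pvChain)))
      = (ws.map (fun w => (match PySem.Str.pyGet? (String.ofList w) 0 with
          | some c => String.ofList [pvSUB.getD c c]
          | none => "").toList)).flatten := by
  intro ws h
  induction ws with
  | nil => simp
  | cons w rest ih =>
    cases w with
    | nil => exact absurd rfl (h [] (by simp))
    | cons c t =>
      have hA : PySem.Str.pyGet? (String.ofList (pvChain c :: t.map pvChain)) 0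
          = some (pvChain c) := by simp [PySem.List.pyGet?, PySem.List.pyIdx?]
      have hB : PySem.Str.pyGet? (String.ofList (c :: t)) 0 = some c := by
        simp [PySem.List.pyGet?, PySem.List.pyIdx?]
      simp only [List.map_cons, List.flatMap_cons, List.flatten_cons, hA, hB,
        Option.map_some, Option.getD_some, String.toList_ofList]
      rw [ih (fun w hw => h w (by simp [hw])), chain_eq_sub c]

-- ===== VERDICT (by name: the statement is the Claim_ definition above) =====
theorem make_password_spec : Claim_equal_make_password := by
  intro phrase _hdom hpre
  unfold Spec_make_password make_password make_password_alt
  have hsplitA : PySem.Str.split? (PySem.Str.replace (PySem.Str.replace (PySem.Str.replace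
      (PySem.Str.replace (PySem.Str.replace (PySem.Str.replace phrase "i" "1") "I" "1")
      "o" "0") "O" "0") "s" "5") "S" "5") " "
      = some (((PySem.Chars.splitOn phrase.toList [' ']).map (List.map pvChain)).map String.ofList) := by
    rw [PySem.Str.split?]
    rw [chain_toList phrase, show (" ":String).toList = [' '] from rfl]
    rw [show PySem.Chars.split? (phrase.toList.map pvChain) [' ']
          = some (PySem.Chars.splitOn (phrase.toList.map pvChain) [' ']) from by
        simp [PySem.Chars.split?]]
    rw [splitOn_map pvChain chain_space]
    rfl
  have hsplitB : PySem.Str.split? phrase " "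
      = some ((PySem.Chars.splitOn phrase.toList [' ']).map String.ofList) := by
    rw [PySem.Str.split?, show (" ":String).toList = [' '] from rfl]
    simp [PySem.Chars.split?]
  rw [hsplitA, hsplitB]
  simp only [Option.getD_some]
  apply String.toList_inj.mp
  rw [String.toList_ofList, PySem.Str.toList_join,
      show ("":String).toList = [] from rfl, join_nil_eq_flatten]
  rw [PySem.List.foldl_append_eq_flatMap (fun w => ((PySem.Str.pyGet? w 0).map (fun c => [c])).getD [])]
  rw [List.map_map, List.map_map]
  simpa [Function.comp_def] using core_flat (PySem.Chars.splitOn phrase.toList [' ']) hpre
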